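-- pv_equiv track=rewrite | github.com/JuanWehitt/Proyecto1-Programacion2 | proyecto1.py | listas_iguales
-- ===== SOURCE A (Python) =====
-- def listas_iguales(l1, l2):
--     if len(l1) != len(l2):
--         return False
--     elif len(l1) != 0:
--         ele1 = l1.pop()
--         ele2 = l2.pop()
--         return ele1 == ele2 and listas_iguales(l1, l2)
--     else:
--         return True
-- ===== SOURCE B (Python) =====
-- def listas_iguales(l1, l2):
--     # Non-mutating one-pass comparison (A empties both lists via pop();
--     # the equivalence claimed is about the RETURN value only).
--     return len(l1) == len(l2) and all(x == y for x, y in zip(l1, l2))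
-- ===== Notes on version B (the rewrite author's own statement) =====
-- stated objective: idiomatic
-- what changed: Replaces the destructive tail recursion that pops the last element of both lists with a single non-mutating forward pass: a length check plus all() over zip(l1, l2); unlike A, B does not empty the argument lists (return value is unchanged).
import Mathlib
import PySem

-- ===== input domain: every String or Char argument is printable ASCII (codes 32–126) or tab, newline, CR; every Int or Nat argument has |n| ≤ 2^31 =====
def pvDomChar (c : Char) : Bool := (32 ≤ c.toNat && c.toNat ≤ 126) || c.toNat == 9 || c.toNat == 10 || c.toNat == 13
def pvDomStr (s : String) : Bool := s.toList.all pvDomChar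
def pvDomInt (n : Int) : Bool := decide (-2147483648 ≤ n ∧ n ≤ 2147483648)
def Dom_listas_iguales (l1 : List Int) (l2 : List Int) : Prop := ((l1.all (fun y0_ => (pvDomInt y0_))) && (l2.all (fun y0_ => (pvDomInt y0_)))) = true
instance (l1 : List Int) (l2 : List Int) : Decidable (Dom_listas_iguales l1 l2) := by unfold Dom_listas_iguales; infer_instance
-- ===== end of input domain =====

-- B replaces A's destructive pop-the-last-element tail recursion with a
-- non-mutating length check plus one forward pass over zip(l1, l2).
-- NOTE on side effects: Python A empties both argument lists via pop(); B does
-- not mutate them. The equivalence proved here is about the RETURN value only.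

-- ===== PORT A =====
-- A pops the last element of each list (l.pop() = PySem.List.pop? l, default index -1) and recurses.
def listas_iguales (l1 : List Int) (l2 : List Int) : Bool :=
  if l1.length ≠ l2.length then false
  else if l1.length ≠ 0 then
    match h1 : PySem.List.pop? l1, h2 : PySem.List.pop? l2 with
    | some (ele1, r1), some (ele2, r2) => (ele1 == ele2) && listas_iguales r1 r2
    | _, _ => false   -- unreachable: both lists are nonempty here, pop? cannot be none
  else true
termination_by l1.length
decreasing_by
  have := PySem.List.length_of_pop?_eq_some l1 h1
  simp at this
  omega

-- ===== PORT B =====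
def listas_iguales_alt (l1 : List Int) (l2 : List Int) : Bool :=
  (l1.length == l2.length) && (l1.zip l2).all (fun p => p.1 == p.2)

-- ===== PRECONDITION & SPEC =====
def Spec_listas_iguales (l1 : List Int) (l2 : List Int) (out : Bool) : Prop := out = listas_iguales_alt l1 l2
instance (l1 : List Int) (l2 : List Int) (out : Bool) : Decidable (Spec_listas_iguales l1 l2 out) := by unfold Spec_listas_iguales; infer_instance

-- ===== CLAIM (what is proved, stated in full; the proofs are below) =====
def Claim_equal_listas_iguales : Prop := ∀ (l1 : List Int) (l2 : List Int), Dom_listas_iguales l1 l2 → Spec_listas_iguales l1 l2 (listas_iguales l1 l2)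

-- ===== LEMMAS AND PROOFS =====

-- Both ports decide plain list equality; the equivalence follows.
theorem alt_eq_decide (l1 l2 : List Int) : listas_iguales_alt l1 l2 = decide (l1 = l2) := by
  induction l1 generalizing l2 with
  | nil => cases l2 <;> simp [listas_iguales_alt]
  | cons x xs ih =>
    cases l2 with
    | nil => simp [listas_iguales_alt]
    | cons y ys =>
      have h := ih ys
      simp only [listas_iguales_alt, List.zip_cons_cons, List.all_cons, List.length_cons] at h ⊢
      by_cases hxy : x = y
      · subst hxy
        have hlen : ((xs.length + 1 == ys.length + 1) : Bool) = (xs.length == ys.length) := by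
          simp
        rw [hlen]
        simp only [beq_self_eq_true, Bool.true_and, h]
        by_cases hx : xs = ys <;> simp [hx]
      · simp [hxy]

theorem a_eq_decide (l1 l2 : List Int) : listas_iguales l1 l2 = decide (l1 = l2) := by
  fun_induction listas_iguales l1 l2 with
  | case1 l1 l2 hlen =>
    have : l1 ≠ l2 := by intro h; exact hlen (by rw [h])
    simp [this]
  | case2 l1 l2 hlen hne ele1 r1 ele2 r2 h1 h2 ih =>
    -- pop? returned the last element and the rest: l1 = r1 ++ [ele1], l2 = r2 ++ [ele2]
    have e1 : l1 = r1 ++ [ele1] := by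
      rcases List.eq_nil_or_concat l1 with rfl | ⟨r, a, rfl⟩
      · simp at hne
      · rw [List.concat_eq_append, PySem.List.pop?_last] at h1
        cases h1; rw [List.concat_eq_append]
    have e2 : l2 = r2 ++ [ele2] := by
      rcases List.eq_nil_or_concat l2 with rfl | ⟨r, a, rfl⟩
      · simp only [List.length_nil] at hlen; omega
      · rw [List.concat_eq_append, PySem.List.pop?_last] at h2
        cases h2; rw [List.concat_eq_append]
    rw [ih]
    subst e1; subst e2
    by_cases he : ele1 = ele2
    · subst he
      by_cases hr : r1 = r2 <;> simp [hr]
    · have hne2 : r1 ++ [ele1] ≠ r2 ++ [ele2] := by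
        intro h
        exact he (List.singleton_inj.mp (List.append_inj' h (by simp)).2)
      simp [he, hne2]
  | case3 l1 l2 hlen hne h =>
    -- unreachable: pop? of a nonempty list is some
    exfalso
    rcases List.eq_nil_or_concat l1 with rfl | ⟨r, a, rfl⟩
    · simp at hne
    rcases List.eq_nil_or_concat l2 with rfl | ⟨s, b, rfl⟩
    · simp at hlen
    rw [List.concat_eq_append] at h
    exact h a r b s (by rw [PySem.List.pop?_last]) (by rw [List.concat_eq_append, PySem.List.pop?_last])
  | case4 l1 l2 hlen hne =>
    have : l1 = [] := List.eq_nil_of_length_eq_zero (by omega)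
    have : l2 = [] := List.eq_nil_of_length_eq_zero (by omega)
    subst this; subst ‹l1 = []›
    simp

-- ===== VERDICT (by name: the statement is the Claim_ definition above) =====
theorem listas_iguales_spec : Claim_equal_listas_iguales := by
  intro l1 l2 _
  unfold Spec_listas_iguales
  rw [a_eq_decide, alt_eq_decide]
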